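-- pv_equiv track=rewrite | github.com/daicang/Leetcode | google-odd-even-jump.py | oddEvenJumps_1
-- ===== SOURCE A (Python) =====
-- def oddEvenJumps_1(A):
--     """
--     :type A: List[int]
--     :rtype: int
--     """
--     size = len(A)
--
--     go_up = [0] * size
--     go_down = [0] * size
--     go_up[-1] = 1
--     go_down[-1] = 1
--
--     for start in range(size-2, -1, -1):
--         last_up = None
--         last_down = None
--         for end in range(start+1, size):
--             if A[end] >= A[start]:
--                 if last_up is None or A[end] < A[last_up]:
--                     last_up = end
--                     go_up[start] = go_down[end]
--
--             if A[end] <= A[start]: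
--                 if last_down is None or A[end] > A[last_down]:
--                     last_down = end
--                     go_down[start] = go_up[end]
--
--     return sum(go_up)
-- ===== SOURCE B (Python) =====
-- def oddEvenJumps_1(A):
--     """
--     :type A: List[int]
--     :rtype: int
--     """
--     n = len(A)
--     if n == 0:
--         return 0
--
--     def next_jumps(order):
--         # order: indices sorted so that the jump target of i is the first
--         # later entry of `order` that is a larger index; monotonic stack.
--         nxt = [None] * n
--         stack = []
--         for i in order:
--             while stack and stack[-1] < i:
--                 nxt[stack.pop()] = i
--             stack.append(i)
--         return nxt
--
--     nxt_up = next_jumps(sorted(range(n), key=lambda i: A[i]))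
--     nxt_down = next_jumps(sorted(range(n), key=lambda i: -A[i]))
--
--     up = [0] * n
--     down = [0] * n
--     up[n - 1] = 1
--     down[n - 1] = 1
--     for i in range(n - 2, -1, -1):
--         if nxt_up[i] is not None:
--             up[i] = down[nxt_up[i]]
--         if nxt_down[i] is not None:
--             down[i] = up[nxt_down[i]]
--     return sum(up)
-- ===== Notes on version B (the rewrite author's own statement) =====
-- stated objective: faster
-- what changed: B replaces A's quadratic per-start rescan of the suffix by one stable sort of the indices per jump direction plus a monotonic stack that yields every next-jump target, followed by the same right-to-left DP (B also returns 0 on the empty list, where A raises IndexError and which Pre_ excludes).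
-- outside the precondition, e.g. on oddEvenJumps_1([]): A raises IndexError, B returns 0
import Mathlib
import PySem

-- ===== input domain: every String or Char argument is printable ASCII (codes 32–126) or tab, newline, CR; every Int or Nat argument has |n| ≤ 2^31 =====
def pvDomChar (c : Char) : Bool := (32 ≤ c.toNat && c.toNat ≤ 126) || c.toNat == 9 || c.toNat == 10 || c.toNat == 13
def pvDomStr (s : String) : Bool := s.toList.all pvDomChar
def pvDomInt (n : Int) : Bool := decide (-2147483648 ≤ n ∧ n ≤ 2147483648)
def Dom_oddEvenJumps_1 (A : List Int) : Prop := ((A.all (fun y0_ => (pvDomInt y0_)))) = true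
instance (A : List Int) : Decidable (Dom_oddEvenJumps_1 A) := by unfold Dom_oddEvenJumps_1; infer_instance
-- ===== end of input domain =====

-- B replaces A's quadratic per-start rescans by one sort per direction plus a
-- monotonic stack that yields every jump target, then the same right-to-left DP
-- (objective: faster, O(n log n) algorithm instead of O(n^2)).

-- ===== PORT A =====
def oddEvenJumps_1 (A : List Int) : Int :=
  let size : Int := PySem.List.len A
  let go_up : List Int := PySem.List.pyRepeat [0] size
  let go_down : List Int := PySem.List.pyRepeat [0] size
  let go_up := PySem.List.pySetD go_up (-1) 1
  let go_down := PySem.List.pySetD go_down (-1) 1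
  let gud :=
    (PySem.List.pyRange (size - 2) (-1) (-1)).foldl (fun (gud : List Int × List Int) start =>
      let st := (PySem.List.pyRange (start + 1) size 1).foldl
        (fun (st : Option Int × Option Int × List Int × List Int) end_ =>
          let lu := st.1; let ld := st.2.1; let gu := st.2.2.1; let gd := st.2.2.2
          let lu_gu :=
            if PySem.List.pyGetD A start 0 ≤ PySem.List.pyGetD A end_ 0 then
              if (match lu with
                  | none => true
                  | some j => decide (PySem.List.pyGetD A end_ 0 < PySem.List.pyGetD A j 0)) then
                (some end_, PySem.List.pySetD gu start (PySem.List.pyGetD gd end_ 0))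
              else (lu, gu)
            else (lu, gu)
          let lu := lu_gu.1; let gu := lu_gu.2
          let ld_gd :=
            if PySem.List.pyGetD A end_ 0 ≤ PySem.List.pyGetD A start 0 then
              if (match ld with
                  | none => true
                  | some j => decide (PySem.List.pyGetD A j 0 < PySem.List.pyGetD A end_ 0)) then
                (some end_, PySem.List.pySetD gd start (PySem.List.pyGetD gu end_ 0))
              else (ld, gd)
            else (ld, gd)
          (lu, ld_gd.1, gu, ld_gd.2))
        (none, none, gud.1, gud.2)
      (st.2.2.1, st.2.2.2))
    (go_up, go_down)
  gud.1.sum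

-- ===== PORT B =====
-- B's stack: Lean list head = Python stack top (stack[-1]); the while-loop of pops
def oejPop (nxt : List (Option Int)) (stack : List Int) (i : Int) :
    List (Option Int) × List Int :=
  match stack with
  | [] => (nxt, [])
  | top :: rest =>
      if top < i then oejPop (PySem.List.pySetD nxt top (some i)) rest i
      else (nxt, top :: rest)

def oejNextJumps (n : Int) (order : List Int) : List (Option Int) :=
  (order.foldl (fun (st : List (Option Int) × List Int) i =>
      let st' := oejPop st.1 st.2 i
      (st'.1, i :: st'.2))
    (PySem.List.pyRepeat [none] n, [])).1

def oddEvenJumps_1_alt (A : List Int) : Int :=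
  let n : Int := PySem.List.len A
  if n = 0 then 0
  else
    let nxt_up := oejNextJumps n
      (PySem.List.sorted (PySem.List.pyRange 0 n 1) (fun i => PySem.List.pyGetD A i 0))
    let nxt_down := oejNextJumps n
      (PySem.List.sorted (PySem.List.pyRange 0 n 1) (fun i => -(PySem.List.pyGetD A i 0)))
    let up : List Int := PySem.List.pySetD (PySem.List.pyRepeat [0] n) (n - 1) 1
    let down : List Int := PySem.List.pySetD (PySem.List.pyRepeat [0] n) (n - 1) 1
    let ud :=
      (PySem.List.pyRange (n - 2) (-1) (-1)).foldl (fun (ud : List Int × List Int) i =>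
        let up := match PySem.List.pyGetD nxt_up i none with
          | some j => PySem.List.pySetD ud.1 i (PySem.List.pyGetD ud.2 j 0)
          | none => ud.1
        let down := match PySem.List.pyGetD nxt_down i none with
          | some j => PySem.List.pySetD ud.2 i (PySem.List.pyGetD up j 0)
          | none => ud.2
        (up, down))
      (up, down)
    ud.1.sum

-- ===== PRECONDITION & SPEC =====
-- Pre_ excludes only the empty list, on which A raises IndexError (go_up[-1] = 1).
def Pre_oddEvenJumps_1 (A : List Int) : Prop := A ≠ []
instance (A : List Int) : Decidable (Pre_oddEvenJumps_1 A) := by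
  unfold Pre_oddEvenJumps_1; infer_instance

def pvWitness_oddEvenJumps_1 : List Int := [10, 13, 12, 14, 15]

def Spec_oddEvenJumps_1 (A : List Int) (out : Int) : Prop := out = oddEvenJumps_1_alt A
instance (A : List Int) (out : Int) : Decidable (Spec_oddEvenJumps_1 A out) := by
  unfold Spec_oddEvenJumps_1; infer_instance

-- ===== CLAIM (what is proved, stated in full; the proofs are below) =====
def Claim_equal_oddEvenJumps_1 : Prop :=
  ∀ (A : List Int), Dom_oddEvenJumps_1 A → Pre_oddEvenJumps_1 A →
    Spec_oddEvenJumps_1 A (oddEvenJumps_1 A)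

-- ===== LEMMAS AND PROOFS =====

-- Both programs pick jump targets by the same rule: among the admissible later
-- indices, the one with extremal value, earliest index on ties — i.e. the
-- lexicographic minimum under `oejLex k`.  Everything below is generic in the
-- key `k` (k = A[·] for up-jumps, k = -A[·] for down-jumps).

def oejLex (k : Int → Int) (a b : Int) : Prop := k a < k b ∨ (k a = k b ∧ a < b)

-- the elements strictly after (the unique occurrence of) i in P
def oejAfter (P : List Int) (i : Int) : List Int :=
  (P.dropWhile (fun y => y ≠ i)).tail

-- first element after i in P that is a larger index: what B's stack pass stores at i
def oejFga (P : List Int) (i : Int) : Option Int :=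
  (oejAfter P i).find? (fun j => decide (i < j))

-- running minimum with a start accumulator; oejMin k none l = PySem.List.min? l k
def oejMin (k : Int → Int) (acc : Option Int) (l : List Int) : Option Int :=
  l.foldl (fun acc x =>
    match acc with
    | none => some x
    | some m => if k x < k m then some x else some m) acc

-- the common jump-target specification
def oejNextSpec (k : Int → Int) (n : Int) (s : Int) : Option Int :=
  oejMin k none ((PySem.List.pyRange (s + 1) n 1).filter (fun j => decide (k s ≤ k j)))

theorem oejLex_asymm {k : Int → Int} {a b : Int} (h1 : oejLex k a b) (h2 : oejLex k b a) : False := by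
  rcases h1 with h1 | ⟨h1, h1'⟩ <;> rcases h2 with h2 | ⟨h2, h2'⟩ <;> omega

theorem oejLex_trans {k : Int → Int} {a b c : Int} (h1 : oejLex k a b) (h2 : oejLex k b c) :
    oejLex k a c := by
  rcases h1 with h1 | ⟨h1, h1'⟩ <;> rcases h2 with h2 | ⟨h2, h2'⟩ <;> unfold oejLex <;> omega

-- ---- oejMin : first lexicographic minimum ----

theorem oejMin_some {k : Int → Int} (l : List Int) (a : Int) :
    ∃ m, oejMin k (some a) l = some m ∧ (m = a ∨ (k m < k a ∧ m ∈ l)) := by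
  induction l generalizing a with
  | nil => exact ⟨a, rfl, Or.inl rfl⟩
  | cons x t ih =>
    show ∃ m, oejMin k (if k x < k a then some x else some a) t = some m ∧ _
    by_cases hxa : k x < k a
    · simp only [if_pos hxa]
      obtain ⟨m, hm, hp⟩ := ih x
      refine ⟨m, hm, Or.inr ?_⟩
      rcases hp with rfl | ⟨h1, h2⟩
      · exact ⟨hxa, List.mem_cons_self ..⟩
      · exact ⟨lt_trans h1 hxa, List.mem_cons_of_mem _ h2⟩
    · simp only [if_neg hxa]
      obtain ⟨m, hm, hp⟩ := ih a
      refine ⟨m, hm, ?_⟩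
      rcases hp with rfl | ⟨h1, h2⟩
      · exact Or.inl rfl
      · exact Or.inr ⟨h1, List.mem_cons_of_mem _ h2⟩

theorem oejMin_first {k : Int → Int} (t : List Int) (a : Int)
    (h : (a :: t).Pairwise (· < ·)) :
    ∃ m, oejMin k (some a) t = some m ∧ m ∈ a :: t ∧
      ∀ j ∈ a :: t, m = j ∨ oejLex k m j := by
  induction t generalizing a with
  | nil => exact ⟨a, rfl, List.mem_cons_self .., by
      intro j hj
      rcases List.mem_cons.1 hj with rfl | hj
      · exact Or.inl rfl
      · exact absurd hj (List.not_mem_nil)⟩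
  | cons x t' ih =>
    have hax : a < x := (List.pairwise_cons.1 h).1 x (List.mem_cons_self ..)
    have hpx : (x :: t').Pairwise (· < ·) := (List.pairwise_cons.1 h).2
    have hpa : (a :: t').Pairwise (· < ·) := by
      rcases List.pairwise_cons.1 h with ⟨h1, h2⟩
      exact List.pairwise_cons.2 ⟨fun y hy => h1 y (List.mem_cons_of_mem _ hy),
        (List.pairwise_cons.1 h2).2⟩
    show ∃ m, oejMin k (if k x < k a then some x else some a) t' = some m ∧ _
    by_cases hxa : k x < k a
    · simp only [if_pos hxa]
      obtain ⟨m, hm, hmem, hp⟩ := ih x hpx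
      refine ⟨m, hm, ?_, ?_⟩
      · exact List.mem_cons_of_mem _ hmem
      · intro j hj
        rcases List.mem_cons.1 hj with rfl | hj
        · refine Or.inr ?_
          have : k m ≤ k x := by
            rcases hp x (List.mem_cons_self ..) with rfl | hl
            · exact le_refl _
            · rcases hl with hl | ⟨hl, _⟩ <;> omega
          exact Or.inl (lt_of_le_of_lt this hxa)
        · exact hp j hj
    · simp only [if_neg hxa]
      obtain ⟨m, hm, hmem, hp⟩ := ih a hpa
      have hlax : oejLex k a x := by
        by_cases hk : k a < k x
        · exact Or.inl hk
        · exact Or.inr ⟨by omega, hax⟩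
      refine ⟨m, hm, ?_, ?_⟩
      · rcases List.mem_cons.1 hmem with rfl | hmem
        · exact List.mem_cons_self ..
        · exact List.mem_cons_of_mem _ (List.mem_cons_of_mem _ hmem)
      · intro j hj
        rcases List.mem_cons.1 hj with rfl | hj
        · exact hp j (List.mem_cons_self ..)
        · rcases List.mem_cons.1 hj with rfl | hj
          · -- j = x
            rcases hp a (List.mem_cons_self ..) with rfl | hl
            · exact Or.inr hlax
            · exact Or.inr (oejLex_trans hl hlax)
          · exact hp j (List.mem_cons_of_mem _ hj)

theorem oejMin_spec {k : Int → Int} (l : List Int) (hl : l.Pairwise (· < ·)) :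
    (oejMin k none l = none → l = []) ∧
    (∀ m, oejMin k none l = some m → m ∈ l ∧ ∀ j ∈ l, m = j ∨ oejLex k m j) := by
  cases l with
  | nil => exact ⟨fun _ => rfl, fun m hm => by simp [oejMin] at hm⟩
  | cons x t =>
    have h1 : oejMin k (none : Option Int) (x :: t) = oejMin k (some x) t := rfl
    obtain ⟨m, hm, hmem, hp⟩ := oejMin_first t x hl
    constructor
    · intro hnone; rw [h1, hm] at hnone; exact absurd hnone (by simp)
    · intro m' hm'; rw [h1, hm] at hm'
      cases hm'; exact ⟨hmem, hp⟩

-- ---- sorted with a key of an index-increasing list is strictly oejLex-sorted ----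

theorem oejInsertBy_lex {k : Int → Int} (ys : List Int) (x : Int)
    (hp : ys.Pairwise (oejLex k)) (hlt : ∀ y ∈ ys, y < x) :
    (PySem.List.insertBy (fun a b => decide (k a < k b)) x ys).Pairwise (oejLex k) := by
  induction ys with
  | nil => simp [PySem.List.insertBy]
  | cons y ys ih =>
    show (if decide (k x < k y) = true then x :: y :: ys
      else y :: PySem.List.insertBy (fun a b => decide (k a < k b)) x ys).Pairwise (oejLex k)
    rcases List.pairwise_cons.1 hp with ⟨hy, hys⟩
    by_cases hk : k x < k y
    · simp only [hk, decide_true, if_pos]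
      refine List.pairwise_cons.2 ⟨?_, hp⟩
      intro z hz
      rcases List.mem_cons.1 hz with rfl | hz
      · exact Or.inl hk
      · have := hy z hz
        rcases this with h | ⟨h, _⟩
        · exact Or.inl (lt_trans hk h)
        · exact Or.inl (by omega)
    · simp only [hk, decide_false, Bool.false_eq_true, if_false]
      refine List.pairwise_cons.2 ⟨?_, ih hys (fun y hy => hlt y (List.mem_cons_of_mem _ hy))⟩
      intro z hz
      rcases (PySem.List.mem_insertBy _ _ _ _).1 hz with rfl | hz
      · by_cases hk2 : k y < k z
        · exact Or.inl hk2
        · exact Or.inr ⟨by omega, hlt y (List.mem_cons_self ..)⟩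
      · exact hy z hz

theorem oejFoldInsert_lex {k : Int → Int} (xs acc : List Int)
    (hacc : acc.Pairwise (oejLex k)) (hcross : ∀ y ∈ acc, ∀ z ∈ xs, y < z)
    (hxs : xs.Pairwise (· < ·)) :
    (xs.foldl (fun acc x => PySem.List.insertBy (fun a b => decide (k a < k b)) x acc)
      acc).Pairwise (oejLex k) := by
  induction xs generalizing acc with
  | nil => exact hacc
  | cons x xs ih =>
    rcases List.pairwise_cons.1 hxs with ⟨hx, hxs'⟩
    refine ih _ ?_ ?_ hxs'
    · exact oejInsertBy_lex acc x hacc (fun y hy => hcross y hy x (List.mem_cons_self ..))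
    · intro y hy z hz
      rcases (PySem.List.mem_insertBy _ _ _ _).1 hy with rfl | hy
      · exact hx z hz
      · exact hcross y hy z (List.mem_cons_of_mem _ hz)

theorem oejSorted_lex (k : Int → Int) (xs : List Int) (hxs : xs.Pairwise (· < ·)) :
    (PySem.List.sorted xs k).Pairwise (oejLex k) := by
  rw [PySem.List.sorted_eq_foldl_insertBy]
  exact oejFoldInsert_lex xs [] (by simp) (by simp) hxs

-- ---- oejFga on an oejLex-sorted permutation is the lexicographic minimum ----

theorem oejLex_irrefl {k : Int → Int} (a : Int) : ¬ oejLex k a a := by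
  unfold oejLex; omega

theorem oejAfter_of_split {P s t : List Int} {i : Int} (hP : P = s ++ i :: t)
    (hs : i ∉ s) : oejAfter P i = t := by
  subst hP
  unfold oejAfter
  rw [List.dropWhile_append]
  have h1 : s.dropWhile (fun y => y ≠ i) = [] := by
    rw [List.dropWhile_eq_nil_iff]
    intro x hx
    simp only [ne_eq, decide_eq_true_eq]
    rintro rfl; exact hs hx
  rw [h1]
  simp

theorem oejFga_spec {k : Int → Int} (O : List Int) (hO : O.Pairwise (oejLex k)) (i : Int)
    (hi : i ∈ O) :
    (oejFga O i = none → ∀ j ∈ O, ¬ (oejLex k i j ∧ i < j)) ∧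
    (∀ m, oejFga O i = some m → (oejLex k i m ∧ i < m) ∧ m ∈ O ∧
      ∀ j ∈ O, (oejLex k i j ∧ i < j) → m = j ∨ oejLex k m j) := by
  obtain ⟨s, t, hst⟩ := List.append_of_mem hi
  subst hst
  rcases List.pairwise_append.1 hO with ⟨hps, hpit, hcross⟩
  rcases List.pairwise_cons.1 hpit with ⟨hit, hpt⟩
  have hs : i ∉ s := fun hmem =>
    oejLex_irrefl i (hcross i hmem i (List.mem_cons_self ..))
  have hafter : oejAfter (s ++ i :: t) i = t := oejAfter_of_split rfl hs
  -- any admissible j lies in t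
  have hjt : ∀ j ∈ s ++ i :: t, oejLex k i j → i < j → j ∈ t := by
    intro j hj hlex hlt
    rcases List.mem_append.1 hj with hj | hj
    · exact absurd hlex (fun h => oejLex_asymm h (hcross j hj i (List.mem_cons_self ..)))
    · rcases List.mem_cons.1 hj with rfl | hj
      · exact absurd hlex (oejLex_irrefl _)
      · exact hj
  constructor
  · intro hnone j hj ⟨hlex, hlt⟩
    unfold oejFga at hnone
    rw [hafter] at hnone
    have := List.find?_eq_none.1 hnone j (hjt j hj hlex hlt)
    simp at this; omega
  · intro m hm
    unfold oejFga at hm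
    rw [hafter] at hm
    rcases List.find?_eq_some_iff_append.1 hm with ⟨hpm, t₁, t₂, ht, hfail⟩
    have hmt : m ∈ t := by rw [ht]; exact List.mem_append.2 (Or.inr (List.mem_cons_self ..))
    have him : i < m := by simpa using hpm
    have hmO : m ∈ s ++ i :: t := List.mem_append.2 (Or.inr (List.mem_cons_of_mem _ hmt))
    refine ⟨⟨hit m hmt, him⟩, hmO, ?_⟩
    intro j hj ⟨hlex, hlt⟩
    have hjt' : j ∈ t := hjt j hj hlex hlt
    rw [ht] at hjt'
    rcases List.mem_append.1 hjt' with hj1 | hj1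
    · have := hfail j hj1
      simp at this; omega
    · rcases List.mem_cons.1 hj1 with rfl | hj1
      · exact Or.inl rfl
      · rcases List.pairwise_append.1 (ht ▸ hpt) with ⟨_, hp2, _⟩
        exact Or.inr ((List.pairwise_cons.1 hp2).1 j hj1)

-- ---- the monotonic stack computes oejFga ----

def oejStep (st : List (Option Int) × List Int) (i : Int) : List (Option Int) × List Int :=
  let st' := oejPop st.1 st.2 i
  (st'.1, i :: st'.2)

def oejInv (n : Nat) (P : List Int) (nxt : List (Option Int)) (sk : List Int) : Prop :=
  nxt.length = n ∧ sk.Pairwise (· < ·) ∧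
  (∀ p ∈ sk, p ∈ P ∧ 0 ≤ p ∧ p < n) ∧
  (∀ p ∈ sk, ∀ y ∈ oejAfter P p, y < p) ∧
  (∀ i : Nat, i < n → nxt.getD i none = oejFga P (i : Int)) ∧
  (∀ i ∈ P, i ∉ sk → (oejFga P i).isSome)

theorem oejHeadEq {l : List Int} {hd : Int} {rest : List Int} (h : l = hd :: rest)
    (hne : l ≠ []) : l.head hne = hd := by subst h; rfl

theorem oejPop_eq (sk : List Int) (nxt : List (Option Int)) (x : Int) :
    oejPop nxt sk x =
      ((sk.takeWhile (fun p => decide (p < x))).foldl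
          (fun nx p => PySem.List.pySetD nx p (some x)) nxt,
        sk.dropWhile (fun p => decide (p < x))) := by
  induction sk generalizing nxt with
  | nil => rfl
  | cons top rest ih =>
    by_cases htop : top < x
    · simp only [oejPop, List.takeWhile_cons, List.dropWhile_cons, htop, decide_true]
      rw [ih]
      rfl
    · simp only [oejPop, List.takeWhile_cons, List.dropWhile_cons, htop, decide_false,
        Bool.false_eq_true, if_false, List.foldl_nil]

theorem oejWrites_length (ps : List Int) (nxt : List (Option Int)) (x : Int) :
    (ps.foldl (fun nx p => PySem.List.pySetD nx p (some x)) nxt).length = nxt.length := by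
  induction ps generalizing nxt with
  | nil => rfl
  | cons p ps ih => simp only [List.foldl_cons]; rw [ih, PySem.List.length_pySetD]

theorem oejWrites_getD (ps : List Int) (nxt : List (Option Int)) (x : Int)
    (hps : ∀ p ∈ ps, 0 ≤ p ∧ p < nxt.length) (i : Nat) :
    (ps.foldl (fun nx p => PySem.List.pySetD nx p (some x)) nxt).getD i none =
      if (i : Int) ∈ ps then some x else nxt.getD i none := by
  induction ps generalizing nxt with
  | nil => simp
  | cons p ps ih =>
    obtain ⟨hp0, hpn⟩ := hps p (List.mem_cons_self ..)
    have hset : PySem.List.pySetD nxt p (some x) = nxt.set p.toNat (some x) :=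
      PySem.List.pySetD_of_nonneg _ _ hp0
    simp only [List.foldl_cons]
    rw [ih _ (by intro q hq; rw [hset, List.length_set]; exact hps q (List.mem_cons_of_mem _ hq))]
    rw [hset]
    by_cases hmem : (i : Int) ∈ ps
    · simp [hmem]
    · simp only [if_false, List.mem_cons, hmem, or_false]
      by_cases hip : (i : Int) = p
      · have : i = p.toNat := by omega
        subst this
        have hlen : p.toNat < nxt.length := by omega
        simp [hip, List.getD_eq_getElem?_getD, hlen]
      · have hne : p.toNat ≠ i := by omega
        simp [hip, List.getD_eq_getElem?_getD, hne]

-- oejAfter / oejFga under appending one element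
theorem oejAfter_append_of_mem {P : List Int} {i : Int} (h : i ∈ P) (Q : List Int) :
    oejAfter (P ++ Q) i = oejAfter P i ++ Q := by
  unfold oejAfter
  rw [List.dropWhile_append]
  have hnn : P.dropWhile (fun y => y ≠ i) ≠ [] := by
    intro hnil
    rw [List.dropWhile_eq_nil_iff] at hnil
    have := hnil i h
    simp at this
  have hne : ¬ (P.dropWhile (fun y => y ≠ i)).isEmpty = true := by
    rw [List.isEmpty_iff]; exact hnn
  rw [if_neg hne]
  rw [List.tail_append_of_ne_nil hnn]

theorem oejAfter_append_self {P : List Int} {x : Int} (h : x ∉ P) :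
    oejAfter (P ++ [x]) x = [] := by
  unfold oejAfter
  rw [List.dropWhile_append]
  have hnil : P.dropWhile (fun y => y ≠ x) = [] := by
    rw [List.dropWhile_eq_nil_iff]
    intro y hy
    simp only [ne_eq, decide_eq_true_eq]
    rintro rfl; exact h hy
  rw [hnil]
  simp [List.dropWhile]

theorem oejAfter_append_of_not_mem {P : List Int} {x i : Int} (hiP : i ∉ P) (hix : i ≠ x) :
    oejAfter (P ++ [x]) i = [] := by
  unfold oejAfter
  have hnil : (P ++ [x]).dropWhile (fun y => y ≠ i) = [] := by
    rw [List.dropWhile_eq_nil_iff]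
    intro y hy
    simp only [ne_eq, decide_eq_true_eq]
    rintro rfl
    rcases List.mem_append.1 hy with hy | hy
    · exact hiP hy
    · rcases List.mem_singleton.1 hy with rfl
      exact hix rfl
  rw [hnil]; rfl

theorem oejFga_not_mem {P : List Int} {i : Int} (h : i ∉ P) : oejFga P i = none := by
  unfold oejFga oejAfter
  have hnil : P.dropWhile (fun y => y ≠ i) = [] := by
    rw [List.dropWhile_eq_nil_iff]
    intro y hy
    simp only [ne_eq, decide_eq_true_eq]
    rintro rfl; exact h hy
  rw [hnil]; rfl

theorem oejFga_append {P : List Int} {i : Int} (h : i ∈ P) (x : Int) :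
    oejFga (P ++ [x]) i = (oejFga P i).or (if i < x then some x else none) := by
  unfold oejFga
  rw [oejAfter_append_of_mem h, List.find?_append]
  congr 1
  simp [List.find?]
  split_ifs with hix <;> simp [hix]

theorem oejFga_none_of_after {P : List Int} {i : Int}
    (h : ∀ y ∈ oejAfter P i, y < i) : oejFga P i = none := by
  unfold oejFga
  rw [List.find?_eq_none]
  intro y hy
  have := h y hy
  simp; omega

theorem oejInv_step {n : Nat} {P : List Int} {nxt : List (Option Int)} {sk : List Int}
    (h : oejInv n P nxt sk) {x : Int} (hx0 : 0 ≤ x) (hxn : x < n) (hxP : x ∉ P) :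
    oejInv n (P ++ [x]) (oejStep (nxt, sk) x).1 (oejStep (nxt, sk) x).2 := by
  obtain ⟨hlen, hpw, hmem, hafter, hnxt, hsome⟩ := h
  have hstep : oejStep (nxt, sk) x =
      ((sk.takeWhile (fun p => decide (p < x))).foldl
          (fun nx p => PySem.List.pySetD nx p (some x)) nxt,
        x :: sk.dropWhile (fun p => decide (p < x))) := by
    unfold oejStep
    rw [oejPop_eq]
  rw [hstep]
  set T := sk.takeWhile (fun p => decide (p < x)) with hT
  set Dp := sk.dropWhile (fun p => decide (p < x)) with hDp
  set W := T.foldl (fun nx p => PySem.List.pySetD nx p (some x)) nxt with hW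
  have hTD : T ++ Dp = sk := List.takeWhile_append_dropWhile
  have hTsub : ∀ p ∈ T, p ∈ sk := fun p hp => by
    rw [← hTD]; exact List.mem_append.2 (Or.inl hp)
  have hDsub : ∀ p ∈ Dp, p ∈ sk := fun p hp => by
    rw [← hTD]; exact List.mem_append.2 (Or.inr hp)
  have hTlt : ∀ p ∈ T, p < x := by
    intro p hp
    have := List.mem_takeWhile_imp hp
    simpa using this
  have hDpw : Dp.Pairwise (· < ·) := List.Pairwise.sublist (List.dropWhile_sublist _) hpw
  have hDge : ∀ e ∈ Dp, x < e := by
    intro e he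
    have hxe : x ≠ e := fun hEq => hxP (hEq ▸ (hmem e (hDsub e he)).1)
    cases hDp' : Dp with
    | nil => rw [hDp'] at he; exact absurd he (List.not_mem_nil)
    | cons hd rest =>
      have h2 : List.dropWhile (fun p => decide (p < x)) sk = hd :: rest := by
        rw [← hDp]; exact hDp'
      have hw : List.dropWhile (fun p => decide (p < x)) sk ≠ [] := by
        rw [h2]; simp
      have h0 := List.head_dropWhile_not (fun p => decide (p < x)) (l := sk) hw
      have h4 : (List.dropWhile (fun p => decide (p < x)) sk).head hw = hd :=
        oejHeadEq h2 hw
      rw [h4] at h0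
      simp only [decide_eq_false_iff_not] at h0
      rw [hDp'] at he hDpw
      rcases List.mem_cons.1 he with rfl | he
      · omega
      · have := (List.pairwise_cons.1 hDpw).1 e he
        omega
  have hTbounds : ∀ p ∈ T, 0 ≤ p ∧ p < (nxt.length : Int) := by
    intro p hp
    obtain ⟨_, h0, hn⟩ := hmem p (hTsub p hp)
    exact ⟨h0, by rw [hlen]; exact hn⟩
  have hWget : ∀ i : Nat, W.getD i none =
      if (i : Int) ∈ T then some x else nxt.getD i none :=
    oejWrites_getD T nxt x hTbounds
  refine ⟨?_, ?_, ?_, ?_, ?_, ?_⟩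
  · rw [hW, oejWrites_length, hlen]
  · exact List.pairwise_cons.2 ⟨hDge, hDpw⟩
  · intro p hp
    rcases List.mem_cons.1 hp with rfl | hp
    · exact ⟨List.mem_append.2 (Or.inr (List.mem_singleton.2 rfl)), hx0, hxn⟩
    · obtain ⟨h1, h2, h3⟩ := hmem p (hDsub p hp)
      exact ⟨List.mem_append.2 (Or.inl h1), h2, h3⟩
  · intro p hp y hy
    rcases List.mem_cons.1 hp with rfl | hp
    · rw [oejAfter_append_self hxP] at hy
      exact absurd hy (List.not_mem_nil)
    · rw [oejAfter_append_of_mem (hmem p (hDsub p hp)).1] at hy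
      rcases List.mem_append.1 hy with hy | hy
      · exact hafter p (hDsub p hp) y hy
      · rcases List.mem_singleton.1 hy with rfl
        exact hDge p hp
  · intro i hi
    rw [hWget i]
    by_cases hiT : (i : Int) ∈ T
    · rw [if_pos hiT]
      have hisk : (i : Int) ∈ sk := hTsub _ hiT
      have hilt : (i : Int) < x := hTlt _ hiT
      have hfnone : oejFga P (i : Int) = none :=
        oejFga_none_of_after (hafter _ hisk)
      rw [oejFga_append (hmem _ hisk).1, hfnone, if_pos hilt]
      rfl
    · rw [if_neg hiT, hnxt i hi]
      by_cases hix : (i : Int) = x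
      · have h1 : oejFga P (i : Int) = none := hix ▸ oejFga_not_mem hxP
        have h2 : oejFga (P ++ [x]) (i : Int) = none := by
          unfold oejFga
          rw [hix, oejAfter_append_self hxP]
          rfl
        rw [h1, h2]
      · by_cases hiP : (i : Int) ∈ P
        · rw [oejFga_append hiP]
          by_cases hisk : (i : Int) ∈ sk
          · have hiD : (i : Int) ∈ Dp := by
              rcases List.mem_append.1 (hTD ▸ hisk) with h | h
              · exact absurd h hiT
              · exact h
            have hxf : ¬ ((i : Int) < x) := by have := hDge _ hiD; omega
            rw [oejFga_none_of_after (hafter _ hisk), if_neg hxf]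
            rfl
          · obtain ⟨j, hj⟩ := Option.isSome_iff_exists.1 (hsome _ hiP hisk)
            rw [hj]
            rfl
        · rw [oejFga_not_mem hiP]
          unfold oejFga
          rw [oejAfter_append_of_not_mem hiP hix]
          rfl
  · intro i hi hiD
    rcases List.mem_append.1 hi with hiP | hix
    · have hix : i ≠ x := fun hEq => hxP (hEq ▸ hiP)
      by_cases hisk : i ∈ sk
      · have hiT : i ∈ T := by
          rcases List.mem_append.1 (hTD ▸ hisk) with h | h
          · exact h
          · exact absurd (List.mem_cons_of_mem x h) hiD
        rw [oejFga_append hiP, oejFga_none_of_after (hafter _ hisk),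
          if_pos (hTlt _ hiT)]
        rfl
      · obtain ⟨j, hj⟩ := Option.isSome_iff_exists.1 (hsome _ hiP hisk)
        rw [oejFga_append hiP, hj]
        rfl
    · rcases List.mem_singleton.1 hix with rfl
      exact absurd (List.mem_cons_self ..) hiD

theorem oejInv_fold {n : Nat} (O : List Int) (hO : O.Nodup)
    (hb : ∀ x ∈ O, 0 ≤ x ∧ x < n) :
    oejInv n O (O.foldl oejStep (List.replicate n none, [])).1
      (O.foldl oejStep (List.replicate n none, [])).2 := by
  induction O using List.reverseRecOn with
  | nil =>
    simp only [List.foldl_nil]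
    refine ⟨List.length_replicate, List.Pairwise.nil, ?_, ?_, ?_, ?_⟩
    · intro p hp; exact absurd hp (List.not_mem_nil)
    · intro p hp; exact absurd hp (List.not_mem_nil)
    · intro i hi
      rw [List.getD_replicate _ hi]
      rfl
    · intro i hi; exact absurd hi (List.not_mem_nil)
  | append_singleton O x ih =>
    simp only [List.foldl_append, List.foldl_cons, List.foldl_nil]
    have hnd : O.Nodup ∧ x ∉ O := by
      rw [List.nodup_append] at hO
      refine ⟨hO.1, fun hx => ?_⟩
      exact hO.2.2 x hx x (List.mem_singleton.2 rfl) rfl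
    obtain ⟨hx0, hxn⟩ := hb x (List.mem_append.2 (Or.inr (List.mem_singleton.2 rfl)))
    have hinv := ih hnd.1 (fun y hy => hb y (List.mem_append.2 (Or.inl hy)))
    exact oejInv_step hinv hx0 hxn hnd.2

-- the stack pass, on an oejLex-sorted permutation of range n, computes oejNextSpec
theorem oejNextJumps_spec (k : Int → Int) (n : Nat) (_hn : 0 < n)
    (i : Nat) (hi : i < n)
    (O : List Int) (hperm : O.Perm (PySem.List.pyRange 0 n 1)) (hlex : O.Pairwise (oejLex k)) :
    PySem.List.pyGetD (oejNextJumps n O) (i : Int) none = oejNextSpec k n i := by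
  have hmemO : ∀ x : Int, x ∈ O ↔ (0 ≤ x ∧ x < (n : Int)) := by
    intro x
    rw [hperm.mem_iff, PySem.List.mem_pyRange_one]
  have hnd : O.Nodup := hperm.nodup_iff.2 (PySem.List.nodup_pyRange_one 0 n)
  have hfold := oejInv_fold (n := n) O hnd (fun x hx => (hmemO x).1 hx)
  obtain ⟨_, _, _, _, hnxt, _⟩ := hfold
  have hOeq : oejNextJumps (n : Int) O =
      (O.foldl oejStep (List.replicate n none, [])).1 := by
    unfold oejNextJumps
    rw [PySem.List.pyRepeat_singleton]
    simp only [Int.toNat_natCast]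
    rfl
  rw [hOeq, PySem.List.pyGetD_natCast, hnxt i hi]
  -- the common set of admissible targets
  set L := (PySem.List.pyRange ((i : Int) + 1) (n : Int) 1).filter
    (fun j => decide (k (i : Int) ≤ k j)) with hL
  have hmemL : ∀ j : Int, j ∈ L ↔ ((i : Int) < j ∧ j < (n : Int) ∧ k (i : Int) ≤ k j) := by
    intro j
    rw [hL, List.mem_filter, PySem.List.mem_pyRange_one]
    simp only [decide_eq_true_eq]
    omega
  have hLpw : L.Pairwise (· < ·) :=
    List.Pairwise.sublist List.filter_sublist
      (PySem.List.pairwise_lt_pyRange_one ((i : Int) + 1) (n : Int))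
  have hiO : (i : Int) ∈ O := (hmemO _).2 ⟨Int.natCast_nonneg i, by exact_mod_cast hi⟩
  have hequiv : ∀ j : Int, j ∈ L ↔ (j ∈ O ∧ oejLex k (i : Int) j ∧ (i : Int) < j) := by
    intro j
    rw [hmemL, hmemO]
    constructor
    · rintro ⟨h1, h2, h3⟩
      refine ⟨⟨by omega, h2⟩, ?_, h1⟩
      rcases lt_or_eq_of_le h3 with h | h
      · exact Or.inl h
      · exact Or.inr ⟨h, h1⟩
    · rintro ⟨⟨h0, h1⟩, h2, h3⟩
      refine ⟨h3, h1, ?_⟩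
      rcases h2 with h | ⟨h, _⟩
      · omega
      · omega
  obtain ⟨hfnone, hfsome⟩ := oejFga_spec O hlex (i : Int) hiO
  obtain ⟨hmnone, hmsome⟩ := oejMin_spec (k := k) L hLpw
  show oejFga O (i : Int) = oejNextSpec k (n : Int) (i : Int)
  unfold oejNextSpec
  rw [← hL]
  cases hf : oejFga O (i : Int) with
  | none =>
    cases hm : oejMin k none L with
    | none => rfl
    | some m =>
      obtain ⟨hmL, _⟩ := hmsome m hm
      obtain ⟨hmO, hlex', hlt⟩ := (hequiv m).1 hmL
      exact absurd ⟨hlex', hlt⟩ (hfnone hf m hmO)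
  | some m =>
    obtain ⟨⟨hlex', hlt⟩, hmO, hmin⟩ := hfsome m hf
    have hmL : m ∈ L := (hequiv m).2 ⟨hmO, hlex', hlt⟩
    cases hm : oejMin k none L with
    | none =>
      rw [hmnone hm] at hmL
      exact absurd hmL (List.not_mem_nil)
    | some m' =>
      obtain ⟨hm'L, hmin'⟩ := hmsome m' hm
      obtain ⟨hm'O, hlex'', hlt'⟩ := (hequiv m').1 hm'L
      have h1 := hmin m' hm'O ⟨hlex'', hlt'⟩
      have h2 := hmin' m hmL
      rcases h1 with rfl | h1
      · rfl
      · rcases h2 with rfl | h2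
        · rfl
        · exact absurd h1 (fun h => oejLex_asymm h h2)

-- ---- A's inner loop computes oejNextSpec as well ----

theorem oejGetD_setD_ne (g : List Int) (s j v d : Int) (h0 : 0 ≤ s) (hj : s < j) :
    PySem.List.pyGetD (PySem.List.pySetD g s v) j d = PySem.List.pyGetD g j d := by
  rw [PySem.List.pySetD_of_nonneg _ _ h0]
  unfold PySem.List.pyGetD
  rw [PySem.List.pyGet?_of_nonneg _ (by omega : (0:Int) ≤ j),
    PySem.List.pyGet?_of_nonneg _ (by omega : (0:Int) ≤ j)]
  rw [List.getElem?_set]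
  have hne : ¬ (s.toNat = j.toNat) := by omega
  simp [hne]

theorem oejSetD_setD (g : List Int) (s v w : Int) (h0 : 0 ≤ s) :
    PySem.List.pySetD (PySem.List.pySetD g s v) s w = PySem.List.pySetD g s w := by
  rw [PySem.List.pySetD_of_nonneg _ _ h0, PySem.List.pySetD_of_nonneg _ _ h0,
    PySem.List.pySetD_of_nonneg _ _ h0, List.set_set]

theorem oejMin_if (k : Int → Int) (lu : Option Int) (e : Int) (F : List Int) (u : Bool)
    (hu : u = true ↔ (match lu with | none => True | some m => k e < k m)) :
    oejMin k lu (e :: F) = oejMin k (if u = true then some e else lu) F := by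
  cases lu with
  | none =>
    simp only [iff_true] at hu
    rw [if_pos hu]
    rfl
  | some m =>
    by_cases h : k e < k m
    · rw [if_pos (hu.2 h)]
      unfold oejMin
      rw [List.foldl_cons]
      simp only [if_pos h]
    · rw [if_neg (fun hc => h (hu.1 hc))]
      unfold oejMin
      rw [List.foldl_cons]
      simp only [if_neg h]

theorem oejMin_mem {k : Int → Int} {F : List Int} {lu : Option Int} {j : Int}
    (h : oejMin k lu F = some j) : lu = some j ∨ j ∈ F := by
  cases lu with
  | none =>
    cases F with
    | nil => exact absurd h (by simp [oejMin])
    | cons x t =>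
      obtain ⟨m, hm, hcase⟩ := oejMin_some (k := k) t x
      have hx : oejMin k (none : Option Int) (x :: t) = oejMin k (some x) t := rfl
      rw [hx, hm] at h
      cases h
      rcases hcase with rfl | ⟨_, hmem⟩
      · exact Or.inr (List.mem_cons_self ..)
      · exact Or.inr (List.mem_cons_of_mem _ hmem)
  | some a =>
    obtain ⟨m, hm, hcase⟩ := oejMin_some (k := k) F a
    rw [h] at hm
    cases hm
    rcases hcase with rfl | ⟨_, hmem⟩
    · exact Or.inl rfl
    · exact Or.inr hmem

def oejUpdU (A : List Int) (e : Int) (lu : Option Int) : Bool :=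
  match lu with
  | none => true
  | some j => decide (PySem.List.pyGetD A e 0 < PySem.List.pyGetD A j 0)

def oejUpdD (A : List Int) (e : Int) (ld : Option Int) : Bool :=
  match ld with
  | none => true
  | some j => decide (PySem.List.pyGetD A j 0 < PySem.List.pyGetD A e 0)

def oejAStep (A : List Int) (s : Int)
    (st : Option Int × Option Int × List Int × List Int) (end_ : Int) :
    Option Int × Option Int × List Int × List Int :=
  let lu := st.1; let ld := st.2.1; let gu := st.2.2.1; let gd := st.2.2.2
  let lu_gu :=
    if PySem.List.pyGetD A s 0 ≤ PySem.List.pyGetD A end_ 0 then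
      if oejUpdU A end_ lu then
        (some end_, PySem.List.pySetD gu s (PySem.List.pyGetD gd end_ 0))
      else (lu, gu)
    else (lu, gu)
  let lu := lu_gu.1; let gu := lu_gu.2
  let ld_gd :=
    if PySem.List.pyGetD A end_ 0 ≤ PySem.List.pyGetD A s 0 then
      if oejUpdD A end_ ld then
        (some end_, PySem.List.pySetD gd s (PySem.List.pyGetD gu end_ 0))
      else (ld, gd)
    else (ld, gd)
  (lu, ld_gd.1, gu, ld_gd.2)

def oejApply (lu M : Option Int) (g : List Int) (s : Int) (r : Int → List Int → Int) (h : List Int) :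
    List Int :=
  match M with
  | none => g
  | some j => if lu = some j then g else PySem.List.pySetD g s (r j h)

theorem oejApply_congr {lu M : Option Int} {g : List Int} {s : Int} {r : Int → List Int → Int}
    {h h' : List Int} (hr : ∀ j, M = some j → ¬ lu = some j → r j h = r j h') :
    oejApply lu M g s r h = oejApply lu M g s r h' := by
  cases M with
  | none => rfl
  | some j =>
    by_cases hl : lu = some j
    · simp [oejApply, hl]
    · simp only [oejApply, if_neg hl, hr j rfl hl]

theorem oejInner_spec (A : List Int) (s : Int) (hs : 0 ≤ s)
    (E : List Int) (hE : ∀ e ∈ E, s < e)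
    (lu ld : Option Int) (gu gd : List Int) :
    E.foldl (oejAStep A s) (lu, ld, gu, gd) =
    (oejMin (fun j => PySem.List.pyGetD A j 0) lu
        (E.filter (fun e => decide (PySem.List.pyGetD A s 0 ≤ PySem.List.pyGetD A e 0))),
     oejMin (fun j => -(PySem.List.pyGetD A j 0)) ld
        (E.filter (fun e => decide (PySem.List.pyGetD A e 0 ≤ PySem.List.pyGetD A s 0))),
     oejApply lu (oejMin (fun j => PySem.List.pyGetD A j 0) lu
        (E.filter (fun e => decide (PySem.List.pyGetD A s 0 ≤ PySem.List.pyGetD A e 0))))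
       gu s (fun j h => PySem.List.pyGetD h j 0) gd,
     oejApply ld (oejMin (fun j => -(PySem.List.pyGetD A j 0)) ld
        (E.filter (fun e => decide (PySem.List.pyGetD A e 0 ≤ PySem.List.pyGetD A s 0))))
       gd s (fun j h => PySem.List.pyGetD h j 0) gu) := by
  revert hE
  induction E generalizing lu ld gu gd with
  | nil =>
    intro hE
    simp only [List.foldl_nil, List.filter_nil]
    cases lu <;> cases ld <;> simp [oejMin, oejApply]
  | cons e E' ih =>
    intro hE
    have hse : s < e := hE e (List.mem_cons_self ..)
    have hE' : ∀ x ∈ E', s < x := fun x hx => hE x (List.mem_cons_of_mem _ hx)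
    rw [List.foldl_cons, List.filter_cons, List.filter_cons]
    have hiffu : (oejUpdU A e lu = true) ↔
        (match lu with
        | none => True
        | some m => PySem.List.pyGetD A e 0 < PySem.List.pyGetD A m 0) := by
      cases lu <;> simp [oejUpdU]
    have hiffd : (oejUpdD A e ld = true) ↔
        (match ld with
        | none => True
        | some m => -(PySem.List.pyGetD A e 0) < -(PySem.List.pyGetD A m 0)) := by
      cases ld with
      | none => simp [oejUpdD]
      | some m =>
        simp only [oejUpdD, decide_eq_true_eq]
        constructor <;> (intro h; omega)
    by_cases hc1 : PySem.List.pyGetD A s 0 ≤ PySem.List.pyGetD A e 0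
    · by_cases hu1 : oejUpdU A e lu = true
      · -- up-branch updates
        have hlu_ne_e : lu ≠ some e := by
          intro hEq
          subst hEq
          simp [oejUpdU] at hu1
        by_cases hc2 : PySem.List.pyGetD A e 0 ≤ PySem.List.pyGetD A s 0
        · by_cases hu2 : oejUpdD A e ld = true
          · -- both update
            have hld_ne_e : ld ≠ some e := by
              intro hEq
              subst hEq
              simp [oejUpdD] at hu2
            have hstep : oejAStep A s (lu, ld, gu, gd) e =
                (some e, some e, PySem.List.pySetD gu s (PySem.List.pyGetD gd e 0),
                  PySem.List.pySetD gd s (PySem.List.pyGetD gu e 0)) := by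
              unfold oejAStep
              simp only [if_pos hc1, if_pos hu1, if_pos hc2, if_pos hu2]
              rw [oejGetD_setD_ne gu s e _ 0 hs hse]
            rw [hstep, ih _ _ _ _ hE']
            simp only [decide_eq_true_eq, hc1, hc2, if_true]
            rw [oejMin_if (fun j => PySem.List.pyGetD A j 0) lu e _ _ hiffu, if_pos hu1]
            rw [oejMin_if (fun j => -(PySem.List.pyGetD A j 0)) ld e _ _ hiffd, if_pos hu2]
            obtain ⟨j₁, hj₁, hcase₁⟩ := oejMin_some
              (k := fun j => PySem.List.pyGetD A j 0)
              (E'.filter (fun x => decide (PySem.List.pyGetD A s 0 ≤ PySem.List.pyGetD A x 0))) e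
            obtain ⟨j₂, hj₂, hcase₂⟩ := oejMin_some
              (k := fun j => -(PySem.List.pyGetD A j 0))
              (E'.filter (fun x => decide (PySem.List.pyGetD A x 0 ≤ PySem.List.pyGetD A s 0))) e
            rw [hj₁, hj₂]
            have h3 : oejApply (some e) (some j₁)
                  (PySem.List.pySetD gu s (PySem.List.pyGetD gd e 0)) s
                  (fun j h => PySem.List.pyGetD h j 0)
                  (PySem.List.pySetD gd s (PySem.List.pyGetD gu e 0)) =
                oejApply lu (some j₁) gu s (fun j h => PySem.List.pyGetD h j 0) gd := by
              simp only [oejApply]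
              rcases hcase₁ with rfl | ⟨hlt₁, hmem₁⟩
              · rw [if_pos rfl, if_neg hlu_ne_e]
              · have hne : ¬ (some e = some j₁) := by
                  intro h
                  cases h
                  exact lt_irrefl _ hlt₁
                have hneR : ¬ (lu = some j₁) := by
                  intro hEq
                  subst hEq
                  simp only [oejUpdU, decide_eq_true_eq] at hu1
                  have hlt₁' : PySem.List.pyGetD A j₁ 0 < PySem.List.pyGetD A e 0 := hlt₁
                  omega
                rw [if_neg hne, if_neg hneR]
                rw [oejSetD_setD gu s _ _ hs]
                rw [oejGetD_setD_ne gd s j₁ _ 0 hs (hE' j₁ (List.mem_of_mem_filter hmem₁))]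
            have h4 : oejApply (some e) (some j₂)
                  (PySem.List.pySetD gd s (PySem.List.pyGetD gu e 0)) s
                  (fun j h => PySem.List.pyGetD h j 0)
                  (PySem.List.pySetD gu s (PySem.List.pyGetD gd e 0)) =
                oejApply ld (some j₂) gd s (fun j h => PySem.List.pyGetD h j 0) gu := by
              simp only [oejApply]
              rcases hcase₂ with rfl | ⟨hlt₂, hmem₂⟩
              · rw [if_pos rfl, if_neg hld_ne_e]
              · have hne : ¬ (some e = some j₂) := by
                  intro h
                  cases h
                  exact lt_irrefl _ hlt₂
                have hneR : ¬ (ld = some j₂) := by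
                  intro hEq
                  subst hEq
                  simp only [oejUpdD, decide_eq_true_eq] at hu2
                  have hlt₂' : -(PySem.List.pyGetD A j₂ 0) < -(PySem.List.pyGetD A e 0) := hlt₂
                  omega
                rw [if_neg hne, if_neg hneR]
                rw [oejSetD_setD gd s _ _ hs]
                rw [oejGetD_setD_ne gu s j₂ _ 0 hs (hE' j₂ (List.mem_of_mem_filter hmem₂))]
            rw [h3, h4]
          · -- up updates, down keeps
            have hstep : oejAStep A s (lu, ld, gu, gd) e =
                (some e, ld, PySem.List.pySetD gu s (PySem.List.pyGetD gd e 0), gd) := by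
              unfold oejAStep
              simp only [if_pos hc1, if_pos hu1, if_pos hc2, if_neg hu2]
            rw [hstep, ih _ _ _ _ hE']
            simp only [decide_eq_true_eq, hc1, hc2, if_true]
            rw [oejMin_if (fun j => PySem.List.pyGetD A j 0) lu e _ _ hiffu, if_pos hu1]
            rw [oejMin_if (fun j => -(PySem.List.pyGetD A j 0)) ld e _ _ hiffd, if_neg hu2]
            obtain ⟨j₁, hj₁, hcase₁⟩ := oejMin_some
              (k := fun j => PySem.List.pyGetD A j 0)
              (E'.filter (fun x => decide (PySem.List.pyGetD A s 0 ≤ PySem.List.pyGetD A x 0))) e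
            rw [hj₁]
            have h3 : oejApply (some e) (some j₁)
                  (PySem.List.pySetD gu s (PySem.List.pyGetD gd e 0)) s
                  (fun j h => PySem.List.pyGetD h j 0) gd =
                oejApply lu (some j₁) gu s (fun j h => PySem.List.pyGetD h j 0) gd := by
              simp only [oejApply]
              rcases hcase₁ with rfl | ⟨hlt₁, hmem₁⟩
              · rw [if_pos rfl, if_neg hlu_ne_e]
              · have hne : ¬ (some e = some j₁) := by
                  intro h
                  cases h
                  exact lt_irrefl _ hlt₁
                have hneR : ¬ (lu = some j₁) := by
                  intro hEq
                  subst hEq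
                  simp only [oejUpdU, decide_eq_true_eq] at hu1
                  have hlt₁' : PySem.List.pyGetD A j₁ 0 < PySem.List.pyGetD A e 0 := hlt₁
                  omega
                rw [if_neg hne, if_neg hneR]
                rw [oejSetD_setD gu s _ _ hs]
            have h4 : oejApply ld (oejMin (fun j => -(PySem.List.pyGetD A j 0)) ld
                  (E'.filter (fun x => decide (PySem.List.pyGetD A x 0 ≤ PySem.List.pyGetD A s 0))))
                  gd s (fun j h => PySem.List.pyGetD h j 0)
                  (PySem.List.pySetD gu s (PySem.List.pyGetD gd e 0)) =
                oejApply ld (oejMin (fun j => -(PySem.List.pyGetD A j 0)) ld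
                  (E'.filter (fun x => decide (PySem.List.pyGetD A x 0 ≤ PySem.List.pyGetD A s 0))))
                  gd s (fun j h => PySem.List.pyGetD h j 0) gu := by
              apply oejApply_congr
              intro j hM _
              exact oejGetD_setD_ne gu s j _ 0 hs
                (hE' j (List.mem_of_mem_filter ((oejMin_mem hM).resolve_left (by
                  intro hEq
                  exact ‹¬ ld = some j› hEq))))
            rw [h3, h4]
        · -- up updates, down condition false
          have hstep : oejAStep A s (lu, ld, gu, gd) e =
              (some e, ld, PySem.List.pySetD gu s (PySem.List.pyGetD gd e 0), gd) := by
            unfold oejAStep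
            simp only [if_pos hc1, if_pos hu1, if_neg hc2]
          rw [hstep, ih _ _ _ _ hE']
          simp only [decide_eq_true_eq, hc1, hc2, if_true, if_false]
          rw [oejMin_if (fun j => PySem.List.pyGetD A j 0) lu e _ _ hiffu, if_pos hu1]
          obtain ⟨j₁, hj₁, hcase₁⟩ := oejMin_some
            (k := fun j => PySem.List.pyGetD A j 0)
            (E'.filter (fun x => decide (PySem.List.pyGetD A s 0 ≤ PySem.List.pyGetD A x 0))) e
          rw [hj₁]
          have h3 : oejApply (some e) (some j₁)
                (PySem.List.pySetD gu s (PySem.List.pyGetD gd e 0)) s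
                (fun j h => PySem.List.pyGetD h j 0) gd =
              oejApply lu (some j₁) gu s (fun j h => PySem.List.pyGetD h j 0) gd := by
            simp only [oejApply]
            rcases hcase₁ with rfl | ⟨hlt₁, hmem₁⟩
            · rw [if_pos rfl, if_neg hlu_ne_e]
            · have hne : ¬ (some e = some j₁) := by
                intro h
                cases h
                exact lt_irrefl _ hlt₁
              have hneR : ¬ (lu = some j₁) := by
                intro hEq
                subst hEq
                simp only [oejUpdU, decide_eq_true_eq] at hu1
                have hlt₁' : PySem.List.pyGetD A j₁ 0 < PySem.List.pyGetD A e 0 := hlt₁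
                omega
              rw [if_neg hne, if_neg hneR]
              rw [oejSetD_setD gu s _ _ hs]
          have h4 : oejApply ld (oejMin (fun j => -(PySem.List.pyGetD A j 0)) ld
                (E'.filter (fun x => decide (PySem.List.pyGetD A x 0 ≤ PySem.List.pyGetD A s 0))))
                gd s (fun j h => PySem.List.pyGetD h j 0)
                (PySem.List.pySetD gu s (PySem.List.pyGetD gd e 0)) =
              oejApply ld (oejMin (fun j => -(PySem.List.pyGetD A j 0)) ld
                (E'.filter (fun x => decide (PySem.List.pyGetD A x 0 ≤ PySem.List.pyGetD A s 0))))
                gd s (fun j h => PySem.List.pyGetD h j 0) gu := by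
            apply oejApply_congr
            intro j hM hld
            exact oejGetD_setD_ne gu s j _ 0 hs
              (hE' j (List.mem_of_mem_filter ((oejMin_mem hM).resolve_left hld)))
          rw [h3, h4]
      · -- up keeps
        by_cases hc2 : PySem.List.pyGetD A e 0 ≤ PySem.List.pyGetD A s 0
        · by_cases hu2 : oejUpdD A e ld = true
          · -- down updates
            have hld_ne_e : ld ≠ some e := by
              intro hEq
              subst hEq
              simp [oejUpdD] at hu2
            have hstep : oejAStep A s (lu, ld, gu, gd) e =
                (lu, some e, gu, PySem.List.pySetD gd s (PySem.List.pyGetD gu e 0)) := by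
              unfold oejAStep
              simp only [if_pos hc1, if_neg hu1, if_pos hc2, if_pos hu2]
            rw [hstep, ih _ _ _ _ hE']
            simp only [decide_eq_true_eq, hc1, hc2, if_true]
            rw [oejMin_if (fun j => PySem.List.pyGetD A j 0) lu e _ _ hiffu, if_neg hu1]
            rw [oejMin_if (fun j => -(PySem.List.pyGetD A j 0)) ld e _ _ hiffd, if_pos hu2]
            obtain ⟨j₂, hj₂, hcase₂⟩ := oejMin_some
              (k := fun j => -(PySem.List.pyGetD A j 0))
              (E'.filter (fun x => decide (PySem.List.pyGetD A x 0 ≤ PySem.List.pyGetD A s 0))) e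
            rw [hj₂]
            have h3 : oejApply lu (oejMin (fun j => PySem.List.pyGetD A j 0) lu
                  (E'.filter (fun x => decide (PySem.List.pyGetD A s 0 ≤ PySem.List.pyGetD A x 0))))
                  gu s (fun j h => PySem.List.pyGetD h j 0)
                  (PySem.List.pySetD gd s (PySem.List.pyGetD gu e 0)) =
                oejApply lu (oejMin (fun j => PySem.List.pyGetD A j 0) lu
                  (E'.filter (fun x => decide (PySem.List.pyGetD A s 0 ≤ PySem.List.pyGetD A x 0))))
                  gu s (fun j h => PySem.List.pyGetD h j 0) gd := by
              apply oejApply_congr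
              intro j hM hlu
              exact oejGetD_setD_ne gd s j _ 0 hs
                (hE' j (List.mem_of_mem_filter ((oejMin_mem hM).resolve_left hlu)))
            have h4 : oejApply (some e) (some j₂)
                  (PySem.List.pySetD gd s (PySem.List.pyGetD gu e 0)) s
                  (fun j h => PySem.List.pyGetD h j 0) gu =
                oejApply ld (some j₂) gd s (fun j h => PySem.List.pyGetD h j 0) gu := by
              simp only [oejApply]
              rcases hcase₂ with rfl | ⟨hlt₂, hmem₂⟩
              · rw [if_pos rfl, if_neg hld_ne_e]
              · have hne : ¬ (some e = some j₂) := by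
                  intro h
                  cases h
                  exact lt_irrefl _ hlt₂
                have hneR : ¬ (ld = some j₂) := by
                  intro hEq
                  subst hEq
                  simp only [oejUpdD, decide_eq_true_eq] at hu2
                  have hlt₂' : -(PySem.List.pyGetD A j₂ 0) < -(PySem.List.pyGetD A e 0) := hlt₂
                  omega
                rw [if_neg hne, if_neg hneR]
                rw [oejSetD_setD gd s _ _ hs]
            rw [h3, h4]
          · -- both keep
            have hstep : oejAStep A s (lu, ld, gu, gd) e = (lu, ld, gu, gd) := by
              unfold oejAStep
              simp only [if_pos hc1, if_neg hu1, if_pos hc2, if_neg hu2]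
            rw [hstep, ih _ _ _ _ hE']
            simp only [decide_eq_true_eq, hc1, hc2, if_true]
            rw [oejMin_if (fun j => PySem.List.pyGetD A j 0) lu e _ _ hiffu, if_neg hu1]
            rw [oejMin_if (fun j => -(PySem.List.pyGetD A j 0)) ld e _ _ hiffd, if_neg hu2]
        · -- up keeps, down condition false
          have hstep : oejAStep A s (lu, ld, gu, gd) e = (lu, ld, gu, gd) := by
            unfold oejAStep
            simp only [if_pos hc1, if_neg hu1, if_neg hc2]
          rw [hstep, ih _ _ _ _ hE']
          simp only [decide_eq_true_eq, hc1, hc2, if_true, if_false]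
          rw [oejMin_if (fun j => PySem.List.pyGetD A j 0) lu e _ _ hiffu, if_neg hu1]
    · -- up condition false
      by_cases hc2 : PySem.List.pyGetD A e 0 ≤ PySem.List.pyGetD A s 0
      · by_cases hu2 : oejUpdD A e ld = true
        · -- down updates
          have hld_ne_e : ld ≠ some e := by
            intro hEq
            subst hEq
            simp [oejUpdD] at hu2
          have hstep : oejAStep A s (lu, ld, gu, gd) e =
              (lu, some e, gu, PySem.List.pySetD gd s (PySem.List.pyGetD gu e 0)) := by
            unfold oejAStep
            simp only [if_neg hc1, if_pos hc2, if_pos hu2]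
          rw [hstep, ih _ _ _ _ hE']
          simp only [decide_eq_true_eq, hc1, hc2, if_true, if_false]
          rw [oejMin_if (fun j => -(PySem.List.pyGetD A j 0)) ld e _ _ hiffd, if_pos hu2]
          obtain ⟨j₂, hj₂, hcase₂⟩ := oejMin_some
            (k := fun j => -(PySem.List.pyGetD A j 0))
            (E'.filter (fun x => decide (PySem.List.pyGetD A x 0 ≤ PySem.List.pyGetD A s 0))) e
          rw [hj₂]
          have h3 : oejApply lu (oejMin (fun j => PySem.List.pyGetD A j 0) lu
                (E'.filter (fun x => decide (PySem.List.pyGetD A s 0 ≤ PySem.List.pyGetD A x 0))))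
                gu s (fun j h => PySem.List.pyGetD h j 0)
                (PySem.List.pySetD gd s (PySem.List.pyGetD gu e 0)) =
              oejApply lu (oejMin (fun j => PySem.List.pyGetD A j 0) lu
                (E'.filter (fun x => decide (PySem.List.pyGetD A s 0 ≤ PySem.List.pyGetD A x 0))))
                gu s (fun j h => PySem.List.pyGetD h j 0) gd := by
            apply oejApply_congr
            intro j hM hlu
            exact oejGetD_setD_ne gd s j _ 0 hs
              (hE' j (List.mem_of_mem_filter ((oejMin_mem hM).resolve_left hlu)))
          have h4 : oejApply (some e) (some j₂)
                (PySem.List.pySetD gd s (PySem.List.pyGetD gu e 0)) s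
                (fun j h => PySem.List.pyGetD h j 0) gu =
              oejApply ld (some j₂) gd s (fun j h => PySem.List.pyGetD h j 0) gu := by
            simp only [oejApply]
            rcases hcase₂ with rfl | ⟨hlt₂, hmem₂⟩
            · rw [if_pos rfl, if_neg hld_ne_e]
            · have hne : ¬ (some e = some j₂) := by
                intro h
                cases h
                exact lt_irrefl _ hlt₂
              have hneR : ¬ (ld = some j₂) := by
                intro hEq
                subst hEq
                simp only [oejUpdD, decide_eq_true_eq] at hu2
                have hlt₂' : -(PySem.List.pyGetD A j₂ 0) < -(PySem.List.pyGetD A e 0) := hlt₂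
                omega
              rw [if_neg hne, if_neg hneR]
              rw [oejSetD_setD gd s _ _ hs]
          rw [h3, h4]
        · -- both keep
          have hstep : oejAStep A s (lu, ld, gu, gd) e = (lu, ld, gu, gd) := by
            unfold oejAStep
            simp only [if_neg hc1, if_pos hc2, if_neg hu2]
          rw [hstep, ih _ _ _ _ hE']
          simp only [decide_eq_true_eq, hc1, hc2, if_true, if_false]
          rw [oejMin_if (fun j => -(PySem.List.pyGetD A j 0)) ld e _ _ hiffd, if_neg hu2]
      · -- both conditions false
        have hstep : oejAStep A s (lu, ld, gu, gd) e = (lu, ld, gu, gd) := by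
          unfold oejAStep
          simp only [if_neg hc1, if_neg hc2]
        rw [hstep, ih _ _ _ _ hE']
        simp only [decide_eq_true_eq, hc1, hc2, if_false]

-- ---- assembling the two programs ----

theorem oejSetD_neg_one (xs : List Int) (v : Int) (h : xs ≠ []) :
    PySem.List.pySetD xs (-1) v = xs.set (xs.length - 1) v := by
  have hl : 0 < xs.length := List.length_pos_iff.2 h
  have h1 : PySem.List.pyIdx? xs.length (-1) = some (xs.length - 1) := by
    simp [PySem.List.pyIdx?]
    omega
  simp [PySem.List.pySetD, PySem.List.pySet?, h1]

-- A's outer loop body, with the inner loop named (definitionally equal to the port's lambda)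
def oejAOuter (A : List Int) (gud : List Int × List Int) (start : Int) : List Int × List Int :=
  let st := (PySem.List.pyRange (start + 1) (PySem.List.len A) 1).foldl (oejAStep A start)
    (none, none, gud.1, gud.2)
  (st.2.2.1, st.2.2.2)

-- B's outer loop body (definitionally equal to the port's lambda)
def oejBOuter (A : List Int) (ud : List Int × List Int) (i : Int) : List Int × List Int :=
  let up := match PySem.List.pyGetD (oejNextJumps (PySem.List.len A)
      (PySem.List.sorted (PySem.List.pyRange 0 (PySem.List.len A) 1)
        (fun i => PySem.List.pyGetD A i 0))) i none with
    | some j => PySem.List.pySetD ud.1 i (PySem.List.pyGetD ud.2 j 0)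
    | none => ud.1
  let down := match PySem.List.pyGetD (oejNextJumps (PySem.List.len A)
      (PySem.List.sorted (PySem.List.pyRange 0 (PySem.List.len A) 1)
        (fun i => -(PySem.List.pyGetD A i 0)))) i none with
    | some j => PySem.List.pySetD ud.2 i (PySem.List.pyGetD up j 0)
    | none => ud.2
  (up, down)

theorem oejStep_agree (A : List Int) (hne : A ≠ []) (gud : List Int × List Int) (i : Int)
    (hi0 : 0 ≤ i) (hi1 : i < PySem.List.len A) :
    oejAOuter A gud i = oejBOuter A gud i := by
  have hlen : 0 < A.length := List.length_pos_iff.2 hne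
  have hE : ∀ e ∈ PySem.List.pyRange (i + 1) (PySem.List.len A) 1, i < e := by
    intro e he
    rw [PySem.List.mem_pyRange_one] at he
    omega
  -- B's next-jump tables compute the common specification
  have hNU : PySem.List.pyGetD (oejNextJumps (PySem.List.len A)
      (PySem.List.sorted (PySem.List.pyRange 0 (PySem.List.len A) 1)
        (fun i => PySem.List.pyGetD A i 0))) i none =
      oejNextSpec (fun j => PySem.List.pyGetD A j 0) (PySem.List.len A) i := by
    have := oejNextJumps_spec (fun j => PySem.List.pyGetD A j 0) A.length hlen i.toNat
      (by rw [PySem.List.len_eq] at hi1; omega)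
      (PySem.List.sorted (PySem.List.pyRange 0 (PySem.List.len A) 1)
        (fun i => PySem.List.pyGetD A i 0))
      (by rw [PySem.List.len_eq]; exact PySem.List.sorted_perm _ _ _)
      (oejSorted_lex _ _ (PySem.List.pairwise_lt_pyRange_one _ _))
    rw [Int.toNat_of_nonneg hi0] at this
    rw [PySem.List.len_eq]
    exact this
  have hND : PySem.List.pyGetD (oejNextJumps (PySem.List.len A)
      (PySem.List.sorted (PySem.List.pyRange 0 (PySem.List.len A) 1)
        (fun i => -(PySem.List.pyGetD A i 0)))) i none =
      oejNextSpec (fun j => -(PySem.List.pyGetD A j 0)) (PySem.List.len A) i := by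
    have := oejNextJumps_spec (fun j => -(PySem.List.pyGetD A j 0)) A.length hlen i.toNat
      (by rw [PySem.List.len_eq] at hi1; omega)
      (PySem.List.sorted (PySem.List.pyRange 0 (PySem.List.len A) 1)
        (fun i => -(PySem.List.pyGetD A i 0)))
      (by rw [PySem.List.len_eq]; exact PySem.List.sorted_perm _ _ _)
      (oejSorted_lex _ _ (PySem.List.pairwise_lt_pyRange_one _ _))
    rw [Int.toNat_of_nonneg hi0] at this
    rw [PySem.List.len_eq]
    exact this
  -- A's inner loop computes the same specification
  have hfun : (fun j => decide ((fun x => -(PySem.List.pyGetD A x 0)) i ≤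
        (fun x => -(PySem.List.pyGetD A x 0)) j)) =
      (fun j => decide (PySem.List.pyGetD A j 0 ≤ PySem.List.pyGetD A i 0)) := by
    funext j
    refine decide_eq_decide.mpr ?_
    show (-(PySem.List.pyGetD A i 0) ≤ -(PySem.List.pyGetD A j 0)) ↔
      (PySem.List.pyGetD A j 0 ≤ PySem.List.pyGetD A i 0)
    omega
  have hspecU : oejNextSpec (fun j => PySem.List.pyGetD A j 0) (PySem.List.len A) i =
      oejMin (fun j => PySem.List.pyGetD A j 0) none
        ((PySem.List.pyRange (i + 1) (PySem.List.len A) 1).filter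
          (fun e => decide (PySem.List.pyGetD A i 0 ≤ PySem.List.pyGetD A e 0))) := rfl
  have hspecD : oejNextSpec (fun j => -(PySem.List.pyGetD A j 0)) (PySem.List.len A) i =
      oejMin (fun j => -(PySem.List.pyGetD A j 0)) none
        ((PySem.List.pyRange (i + 1) (PySem.List.len A) 1).filter
          (fun e => decide (PySem.List.pyGetD A e 0 ≤ PySem.List.pyGetD A i 0))) := by
    unfold oejNextSpec
    rw [hfun]
  unfold oejAOuter oejBOuter
  rw [oejInner_spec A i hi0 _ hE none none gud.1 gud.2, hNU, hND, hspecU, hspecD]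
  cases hM1 : oejMin (fun j => PySem.List.pyGetD A j 0) none
      ((PySem.List.pyRange (i + 1) (PySem.List.len A) 1).filter
        (fun e => decide (PySem.List.pyGetD A i 0 ≤ PySem.List.pyGetD A e 0))) with
  | none =>
    cases hM2 : oejMin (fun j => -(PySem.List.pyGetD A j 0)) none
        ((PySem.List.pyRange (i + 1) (PySem.List.len A) 1).filter
          (fun e => decide (PySem.List.pyGetD A e 0 ≤ PySem.List.pyGetD A i 0))) with
    | none => simp [oejApply]
    | some j₂ => simp [oejApply]
  | some j₁ =>
    have hij₁ : i < j₁ := by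
      rcases oejMin_mem hM1 with h | h
      · exact absurd h (by simp)
      · exact hE j₁ (List.mem_of_mem_filter h)
    cases hM2 : oejMin (fun j => -(PySem.List.pyGetD A j 0)) none
        ((PySem.List.pyRange (i + 1) (PySem.List.len A) 1).filter
          (fun e => decide (PySem.List.pyGetD A e 0 ≤ PySem.List.pyGetD A i 0))) with
    | none => simp [oejApply]
    | some j₂ =>
      have hij₂ : i < j₂ := by
        rcases oejMin_mem hM2 with h | h
        · exact absurd h (by simp)
        · exact hE j₂ (List.mem_of_mem_filter h)
      simp only [oejApply]
      rw [if_neg (by simp), if_neg (by simp)]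
      rw [oejGetD_setD_ne gud.1 i j₂ _ 0 hi0 hij₂]

-- ===== VERDICT (by name: the statement is the Claim_ definition above) =====
theorem oddEvenJumps_1_spec : Claim_equal_oddEvenJumps_1 := by
  intro A _ hne
  show oddEvenJumps_1 A = oddEvenJumps_1_alt A
  have hlen : 0 < A.length := List.length_pos_iff.2 hne
  have hA : oddEvenJumps_1 A =
      ((PySem.List.pyRange (PySem.List.len A - 2) (-1) (-1)).foldl (oejAOuter A)
        (PySem.List.pySetD (PySem.List.pyRepeat [0] (PySem.List.len A)) (-1) 1,
         PySem.List.pySetD (PySem.List.pyRepeat [0] (PySem.List.len A)) (-1) 1)).1.sum := rfl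
  have hne0 : ¬ (PySem.List.len A = 0) := by
    rw [PySem.List.len_eq]
    omega
  have hB : oddEvenJumps_1_alt A =
      ((PySem.List.pyRange (PySem.List.len A - 2) (-1) (-1)).foldl (oejBOuter A)
        (PySem.List.pySetD (PySem.List.pyRepeat [0] (PySem.List.len A)) (PySem.List.len A - 1) 1,
         PySem.List.pySetD (PySem.List.pyRepeat [0] (PySem.List.len A)) (PySem.List.len A - 1) 1)).1.sum := by
    unfold oddEvenJumps_1_alt
    rw [if_neg hne0]
    rfl
  have hinit : PySem.List.pySetD (PySem.List.pyRepeat [(0 : Int)] (PySem.List.len A)) (-1) 1 =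
      PySem.List.pySetD (PySem.List.pyRepeat [(0 : Int)] (PySem.List.len A))
        (PySem.List.len A - 1) 1 := by
    have hrep : PySem.List.pyRepeat [(0 : Int)] (PySem.List.len A) =
        List.replicate A.length 0 := by
      rw [PySem.List.pyRepeat_singleton, PySem.List.len_eq, Int.toNat_natCast]
    have h0 : (0 : Int) ≤ PySem.List.len A - 1 := by
      rw [PySem.List.len_eq]
      omega
    rw [hrep, oejSetD_neg_one _ _ (List.ne_nil_of_length_pos (by simpa using hlen)),
      PySem.List.pySetD_of_nonneg _ _ h0]
    simp only [List.length_replicate]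
    congr 1
    rw [PySem.List.len_eq]
    omega
  rw [hA, hB, hinit]
  congr 1
  congr 1
  apply PySem.List.foldl_congr_mem
  intro gud i hi
  have hib : 0 ≤ i ∧ i ≤ PySem.List.len A - 2 := by
    rw [PySem.List.pyRange_neg_one] at hi
    rcases List.mem_map.1 hi with ⟨p, hp, rfl⟩
    rw [List.mem_range] at hp
    rw [PySem.List.len_eq] at *
    omega
  exact oejStep_agree A hne gud i hib.1 (by omega)
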